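-- pv_equiv track=rewrite | github.com/Law-AI/ilsic | Codes/ILSIC/Ablation Study/Ablation Study on RAG Setups/RAG_gpt_k_stat_from_QQ-sBert.py | _hm_intelligent_split_section_act
-- ===== SOURCE A (Python) =====
-- from typing import List, Dict, Any, Optional, Tuple
--
-- def _hm_normalize_identifier_token(token: str) -> str:
--     result = []
--     for c in token:
--         if c in "([":
--             break
--         if c.isalnum():
--             result.append(c)
--     return "".join(result)
--
-- def _hm_analyze_text_structure(text: str) -> Dict:
--     if not text:
--         return {}
--     words = text.split()
--     analysis = {
--         "words": words, "word_count": len(words),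
--         "numeric_words": [], "short_alphanum_words": [], "long_words": [],
--         "potential_identifiers": [],
--     }
--     for i, word in enumerate(words):
--         normalized = _hm_normalize_identifier_token(word)
--         if normalized.isdigit():
--             analysis["numeric_words"].append((i, normalized))
--         elif len(normalized) <= 5 and any(c.isdigit() for c in normalized):
--             analysis["short_alphanum_words"].append((i, normalized))
--         elif len(normalized) > 8:
--             analysis["long_words"].append((i, normalized))
--         if len(word) <= 6 and (any(c.isdigit() for c in normalized) or any(x in word for x in "()[].")):
--             analysis["potential_identifiers"].append((i, word))
--     return analysis
--
-- def _hm_find_section_identifier(text: str) -> Tuple[Optional[str], int]: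
--     analysis = _hm_analyze_text_structure(text)
--     words = analysis.get("words", [])
--     for pos, num in analysis.get("numeric_words", []):
--         if pos <= 2:
--             if pos + 1 < len(words):
--                 nxt = words[pos + 1]
--                 if len(nxt) == 1 and nxt.isalpha():
--                     return num + nxt, pos
--             return num, pos
--     for pos, word in analysis.get("short_alphanum_words", []):
--         if pos <= 3:
--             return word, pos
--     for pos, word in analysis.get("potential_identifiers", []):
--         if pos <= 3:
--             cleaned = _hm_normalize_identifier_token(word)
--             if cleaned:
--                 return cleaned, pos
--     return None, -1
--
-- def _hm_intelligent_split_section_act(text: str) -> Tuple[Optional[str], Optional[str]]: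
--     text = text.strip()
--     if not text:
--         return None, None
--     words = text.split()
--     if len(words) < 2:
--         return text, ""
--     identifier, pos = _hm_find_section_identifier(text)
--     if identifier and pos >= 0:
--         section_words = []
--         if pos > 0:
--             prev_word = words[pos - 1]
--             if len(prev_word) <= 10 and not any(c.isdigit() for c in prev_word):
--                 section_words.append(prev_word)
--         section_words.append(identifier)
--         section = " ".join(section_words).strip()
--         used = set(w.lower() for w in section_words)
--         remaining = [w for w in words if w.lower() not in used]
--         act = " ".join(remaining).strip()
--         return section, act
--     return None, text
-- ===== SOURCE B (Python) =====
-- # B: one forward pass over the first four words that records the first identifier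
-- # candidate of each kind, instead of building category lists for every word and
-- # rescanning them; the analysis dict and the unused long-words list disappear.
--
-- def _b_normalize(token):
--     out = []
--     for c in token:
--         if c in "([":
--             break
--         if c.isalnum():
--             out.append(c)
--     return "".join(out)
--
--
-- def _hm_intelligent_split_section_act(text):
--     text = text.strip()
--     if not text:
--         return None, None
--     words = text.split()
--     if len(words) < 2:
--         return text, ""
--
--     # Identifier candidates can only sit in the first four words:
--     # a purely numeric token within the first three, a short token containing a
--     # digit within the first four, or a short punctuated/digit-bearing token
--     # within the first four that still has alphanumeric content.
--     numeric = short = punct = None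
--     for i, w in enumerate(words[:4]):
--         n = _b_normalize(w)
--         if n.isdigit():
--             if numeric is None and i <= 2:
--                 numeric = (i, n)
--         elif len(n) <= 5 and any(c.isdigit() for c in n):
--             if short is None:
--                 short = (i, n)
--         if punct is None and n and len(w) <= 6 and \
--                 (any(c.isdigit() for c in n) or any(x in w for x in "()[].")):
--             punct = (i, n)
--
--     if numeric is not None:
--         pos, ident = numeric
--         # a lone letter right after a number belongs to the identifier: "12 A"
--         if pos + 1 < len(words) and len(words[pos + 1]) == 1 and words[pos + 1].isalpha():
--             ident += words[pos + 1]
--     elif short is not None: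
--         pos, ident = short
--     elif punct is not None:
--         pos, ident = punct
--     else:
--         return None, text
--
--     section_words = []
--     if pos > 0:
--         prev = words[pos - 1]
--         if len(prev) <= 10 and not any(c.isdigit() for c in prev):
--             section_words.append(prev)
--     section_words.append(ident)
--     section = " ".join(section_words).strip()
--     used = {w.lower() for w in section_words}
--     act = " ".join(w for w in words if w.lower() not in used).strip()
--     return section, act
-- ===== Notes on version B (the rewrite author's own statement) =====
-- stated objective: simpler
-- what changed: Replaces A's pipeline that builds an analysis dict of four category lists over all words and then rescans three of them position by position with one forward pass over the first four words that records the first numeric, first short-alphanumeric and first usable punctuated candidate directly; the dict and the unused long_words list disappear.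
import Mathlib
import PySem

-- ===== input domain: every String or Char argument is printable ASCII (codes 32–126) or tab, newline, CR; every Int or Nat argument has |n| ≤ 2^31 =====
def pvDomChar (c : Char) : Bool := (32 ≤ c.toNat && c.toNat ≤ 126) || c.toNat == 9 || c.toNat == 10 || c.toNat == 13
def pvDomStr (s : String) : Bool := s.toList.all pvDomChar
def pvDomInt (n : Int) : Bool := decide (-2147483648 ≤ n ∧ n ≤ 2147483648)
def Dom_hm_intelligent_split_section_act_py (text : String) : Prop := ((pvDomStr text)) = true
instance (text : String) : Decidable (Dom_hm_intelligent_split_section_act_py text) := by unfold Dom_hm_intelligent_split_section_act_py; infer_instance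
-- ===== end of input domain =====

-- B replaces A's build-four-category-lists-then-rescan pipeline (analysis dict, unused
-- long_words) by one forward pass over the first four words recording the first candidate
-- of each kind; same return value, same cost class.

-- shared small helpers (identical inline expressions in both Python versions)
def pvNorm : List Char → List Char
  | [] => []
  | c :: cs =>
    if c = '(' ∨ c = '[' then []
    else if PySem.Chars.isalnum c then c :: pvNorm cs else pvNorm cs

def pvAnyDigit (cs : List Char) : Bool := cs.any PySem.Chars.isdigit

def pvHasIdPunct (w : List Char) : Bool := ['(', ')', '[', ']', '.'].any (fun x => w.contains x)

-- ===== PORT A =====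
-- the analysis dict of A is represented by the tuple (words, (numeric, short_alphanum, long, potential));
-- the four category lists are built by the same enumerate-fold, long_words kept though unused (as in A)
def pvAnalyzeA (text : List Char) :
    List (List Char) ×
      (List (Int × List Char) × List (Int × List Char) × List (Int × List Char) × List (Int × List Char)) :=
  if text = [] then ([], ([], [], [], [])) else
  let words := PySem.Chars.split₀ text
  let lists := (PySem.List.enumerate words 0).foldl
    (fun acc iw =>
      let (nu, sh, lo, po) := acc
      let i := iw.1
      let word := iw.2
      let n := pvNorm word
      let (nu, sh, lo) :=
        if PySem.Chars.strIsdigit n then (nu ++ [(i, n)], sh, lo)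
        else if n.length ≤ 5 ∧ pvAnyDigit n then (nu, sh ++ [(i, n)], lo)
        else if n.length > 8 then (nu, sh, lo ++ [(i, n)])
        else (nu, sh, lo)
      let po := if word.length ≤ 6 ∧ (pvAnyDigit n ∨ pvHasIdPunct word) then po ++ [(i, word)] else po
      (nu, sh, lo, po))
    ([], [], [], [])
  (words, lists)

def pvFindIdentA (text : List Char) : Option (List Char) × Int :=
  let a := pvAnalyzeA text
  let words := a.1
  match a.2.1.find? (fun p => decide (p.1 ≤ 2)) with
  | some (pos, num) =>
    if pos + 1 < PySem.List.len words then
      let nxt := PySem.List.pyGetD words (pos + 1) []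
      if nxt.length = 1 ∧ PySem.Chars.strIsalpha nxt then (some (num ++ nxt), pos) else (some num, pos)
    else (some num, pos)
  | none =>
  match a.2.2.1.find? (fun p => decide (p.1 ≤ 3)) with
  | some (pos, w) => (some w, pos)
  | none =>
  match a.2.2.2.2.find? (fun p => decide (p.1 ≤ 3) && decide (pvNorm p.2 ≠ [])) with
  | some (pos, w) => (some (pvNorm w), pos)
  | none => (none, -1)

def hm_intelligent_split_section_act_py (text : String) : Option String × Option String :=
  let t := PySem.Chars.strip text.toList
  if t = [] then (none, none) else
  let words := PySem.Chars.split₀ t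
  if words.length < 2 then (some (String.ofList t), some "") else
  match pvFindIdentA t with
  | (some ident, pos) =>
    if ident ≠ [] ∧ 0 ≤ pos then
      let sw :=
        (if 0 < pos then
          let prev := PySem.List.pyGetD words (pos - 1) []
          if prev.length ≤ 10 ∧ ¬ pvAnyDigit prev = true then [prev] else []
        else []) ++ [ident]
      let sec := PySem.Chars.strip (PySem.Chars.join [' '] sw)
      let used := PySem.Set.ofList (sw.map PySem.Chars.lower)
      let remaining := words.filter (fun w => decide (PySem.Chars.lower w ∉ used))
      let act := PySem.Chars.strip (PySem.Chars.join [' '] remaining)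
      (some (String.ofList sec), some (String.ofList act))
    else (none, some (String.ofList t))
  | (none, _) => (none, some (String.ofList t))

-- ===== PORT B =====
-- the body of Source B's single forward loop over enumerate(words[:4])
def pvScanStep
    (acc : Option (Int × List Char) × Option (Int × List Char) × Option (Int × List Char))
    (iw : Int × List Char) :
    Option (Int × List Char) × Option (Int × List Char) × Option (Int × List Char) :=
  let numeric := acc.1
  let short := acc.2.1
  let punct := acc.2.2
  let i := iw.1
  let w := iw.2
  let n := pvNorm w
  let (numeric, short) :=
    if PySem.Chars.strIsdigit n then
      (if numeric = none ∧ i ≤ 2 then some (i, n) else numeric, short)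
    else if n.length ≤ 5 ∧ pvAnyDigit n then
      (numeric, if short = none then some (i, n) else short)
    else (numeric, short)
  let punct :=
    if punct = none ∧ n ≠ [] ∧ w.length ≤ 6 ∧ (pvAnyDigit n ∨ pvHasIdPunct w) then some (i, n)
    else punct
  (numeric, short, punct)

def pvScanB (words : List (List Char)) :
    Option (Int × List Char) × Option (Int × List Char) × Option (Int × List Char) :=
  (PySem.List.enumerate (PySem.List.slice words none (some 4)) 0).foldl pvScanStep
    (none, none, none)

def pvBuildB (words : List (List Char)) (pos : Int) (ident : List Char) : Option String × Option String :=
  let sw :=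
    (if 0 < pos then
      let prev := PySem.List.pyGetD words (pos - 1) []
      if prev.length ≤ 10 ∧ ¬ pvAnyDigit prev = true then [prev] else []
    else []) ++ [ident]
  let used := PySem.Set.ofList (sw.map PySem.Chars.lower)
  let remaining := words.filter (fun w => decide (PySem.Chars.lower w ∉ used))
  (some (String.ofList (PySem.Chars.strip (PySem.Chars.join [' '] sw))),
   some (String.ofList (PySem.Chars.strip (PySem.Chars.join [' '] remaining))))

def hm_intelligent_split_section_act_py_alt (text : String) : Option String × Option String :=
  let t := PySem.Chars.strip text.toList
  if t = [] then (none, none) else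
  let words := PySem.Chars.split₀ t
  if words.length < 2 then (some (String.ofList t), some "") else
  match pvScanB words with
  | (some (pos, n), _, _) =>
    let ident :=
      if pos + 1 < PySem.List.len words then
        let nxt := PySem.List.pyGetD words (pos + 1) []
        if nxt.length = 1 ∧ PySem.Chars.strIsalpha nxt then n ++ nxt else n
      else n
    pvBuildB words pos ident
  | (none, some (pos, n), _) => pvBuildB words pos n
  | (none, none, some (pos, n)) => pvBuildB words pos n
  | (none, none, none) => (none, some (String.ofList t))

-- ===== PRECONDITION & SPEC =====
def Spec_hm_intelligent_split_section_act_py (text : String) (out : Option String × Option String) : Prop := out = hm_intelligent_split_section_act_py_alt text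
instance (text : String) (out : Option String × Option String) : Decidable (Spec_hm_intelligent_split_section_act_py text out) := by unfold Spec_hm_intelligent_split_section_act_py; infer_instance

-- ===== CLAIM (what is proved, stated in full; the proofs are below) =====
def Claim_equal_hm_intelligent_split_section_act_py : Prop := ∀ (text : String), Dom_hm_intelligent_split_section_act_py text → Spec_hm_intelligent_split_section_act_py text (hm_intelligent_split_section_act_py text)

-- ===== LEMMAS AND PROOFS =====

-- the category lists of A, as structural recursions with an explicit start index
def pvNumF (i : Int) : List (List Char) → List (Int × List Char)
  | [] => []
  | w :: ws =>
    if PySem.Chars.strIsdigit (pvNorm w) then (i, pvNorm w) :: pvNumF (i + 1) ws else pvNumF (i + 1) ws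

def pvShF (i : Int) : List (List Char) → List (Int × List Char)
  | [] => []
  | w :: ws =>
    if ¬ PySem.Chars.strIsdigit (pvNorm w) = true ∧ (pvNorm w).length ≤ 5 ∧ pvAnyDigit (pvNorm w) then
      (i, pvNorm w) :: pvShF (i + 1) ws
    else pvShF (i + 1) ws

def pvPoF (i : Int) : List (List Char) → List (Int × List Char)
  | [] => []
  | w :: ws =>
    if w.length ≤ 6 ∧ (pvAnyDigit (pvNorm w) ∨ pvHasIdPunct w) then (i, w) :: pvPoF (i + 1) ws
    else pvPoF (i + 1) ws

-- potential identifiers with a nonempty normalization, already normalized (B records these)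
def pvPoN (i : Int) : List (List Char) → List (Int × List Char)
  | [] => []
  | w :: ws =>
    if pvNorm w ≠ [] ∧ w.length ≤ 6 ∧ (pvAnyDigit (pvNorm w) ∨ pvHasIdPunct w) then
      (i, pvNorm w) :: pvPoN (i + 1) ws
    else pvPoN (i + 1) ws

def pvLoF (i : Int) : List (List Char) → List (Int × List Char)
  | [] => []
  | w :: ws =>
    if ¬ PySem.Chars.strIsdigit (pvNorm w) = true ∧
        ¬ ((pvNorm w).length ≤ 5 ∧ pvAnyDigit (pvNorm w) = true) ∧ (pvNorm w).length > 8 then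
      (i, pvNorm w) :: pvLoF (i + 1) ws
    else pvLoF (i + 1) ws

theorem pvFoldA_general (ws : List (List Char)) : ∀ (s : Int)
    (nu sh lo po : List (Int × List Char)),
    (PySem.List.enumerate ws s).foldl
      (fun acc iw =>
        let (nu, sh, lo, po) := acc
        let i := iw.1
        let word := iw.2
        let n := pvNorm word
        let (nu, sh, lo) :=
          if PySem.Chars.strIsdigit n then (nu ++ [(i, n)], sh, lo)
          else if n.length ≤ 5 ∧ pvAnyDigit n then (nu, sh ++ [(i, n)], lo)
          else if n.length > 8 then (nu, sh, lo ++ [(i, n)])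
          else (nu, sh, lo)
        let po := if word.length ≤ 6 ∧ (pvAnyDigit n ∨ pvHasIdPunct word) then po ++ [(i, word)] else po
        (nu, sh, lo, po))
      (nu, sh, lo, po)
    = (nu ++ pvNumF s ws, sh ++ pvShF s ws, lo ++ pvLoF s ws, po ++ pvPoF s ws) := by
  induction ws with
  | nil => intro s nu sh lo po; simp [pvNumF, pvShF, pvLoF, pvPoF, PySem.List.enumerate_nil]
  | cons w ws ih =>
    intro s nu sh lo po
    rw [PySem.List.enumerate_cons]
    simp only [List.foldl_cons]
    simp only [pvNumF, pvShF, pvLoF, pvPoF]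
    by_cases h1 : PySem.Chars.strIsdigit (pvNorm w) = true
    · by_cases h4 : w.length ≤ 6 ∧ (pvAnyDigit (pvNorm w) = true ∨ pvHasIdPunct w = true) <;>
        simp [h1, h4, ih, List.append_assoc]
    · by_cases h2 : (pvNorm w).length ≤ 5 ∧ pvAnyDigit (pvNorm w) = true
      · by_cases h4 : w.length ≤ 6 ∧ (pvAnyDigit (pvNorm w) = true ∨ pvHasIdPunct w = true) <;>
          · simp [h1, h2, h4, ih, List.append_assoc]
            try (split <;> simp_all)
      · by_cases h3 : (pvNorm w).length > 8 <;>
          by_cases h4 : w.length ≤ 6 ∧ (pvAnyDigit (pvNorm w) = true ∨ pvHasIdPunct w = true) <;>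
            simp [h1, h2, h3, h4, ih, List.append_assoc]

theorem pvAnalyzeA_eq (t : List Char) (ht : t ≠ []) :
    pvAnalyzeA t = (PySem.Chars.split₀ t,
      (pvNumF 0 (PySem.Chars.split₀ t), pvShF 0 (PySem.Chars.split₀ t),
       pvLoF 0 (PySem.Chars.split₀ t), pvPoF 0 (PySem.Chars.split₀ t))) := by
  unfold pvAnalyzeA
  rw [if_neg ht]
  simp only [pvFoldA_general, List.nil_append]

theorem pvNumF_find_none (ws : List (List Char)) : ∀ (i : Int), 2 < i →
    (pvNumF i ws).find? (fun p => decide (p.1 ≤ 2)) = none := by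
  induction ws with
  | nil => intro i _; simp [pvNumF]
  | cons w ws ih =>
    intro i hi
    simp only [pvNumF]
    split
    · rw [List.find?_cons_of_neg]
      · exact ih (i + 1) (by omega)
      · simp; omega
    · exact ih (i + 1) (by omega)

theorem pvShF_find_none (ws : List (List Char)) : ∀ (i : Int), 3 < i →
    (pvShF i ws).find? (fun p => decide (p.1 ≤ 3)) = none := by
  induction ws with
  | nil => intro i _; simp [pvShF]
  | cons w ws ih =>
    intro i hi
    simp only [pvShF]
    split
    · rw [List.find?_cons_of_neg]
      · exact ih (i + 1) (by omega)
      · simp; omega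
    · exact ih (i + 1) (by omega)

theorem pvPoF_find_none (ws : List (List Char)) : ∀ (i : Int), 3 < i →
    (pvPoF i ws).find? (fun p => decide (p.1 ≤ 3) && decide (pvNorm p.2 ≠ [])) = none := by
  induction ws with
  | nil => intro i _; simp [pvPoF]
  | cons w ws ih =>
    intro i hi
    simp only [pvPoF]
    split
    · rw [List.find?_cons_of_neg]
      · exact ih (i + 1) (by omega)
      · simp; omega
    · exact ih (i + 1) (by omega)

-- B's forward loop computes the first match of each of the three categories
theorem pvScan_fold (ws : List (List Char)) : ∀ (i : Int)
    (a b c : Option (Int × List Char)),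
    (PySem.List.enumerate ws i).foldl pvScanStep (a, b, c) =
      (a.or ((pvNumF i ws).find? (fun p => decide (p.1 ≤ 2))),
       b.or ((pvShF i ws).head?),
       c.or ((pvPoN i ws).head?)) := by
  induction ws with
  | nil => intro i a b c; simp [PySem.List.enumerate_nil, pvNumF, pvShF, pvPoN]
  | cons w ws ih =>
    intro i a b c
    rw [PySem.List.enumerate_cons]
    simp only [List.foldl_cons, pvScanStep]
    simp only [pvNumF, pvShF, pvPoN]
    by_cases h1 : PySem.Chars.strIsdigit (pvNorm w) = true <;>
      by_cases h2 : i ≤ 2 <;>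
      by_cases h3 : (pvNorm w).length ≤ 5 ∧ pvAnyDigit (pvNorm w) = true <;>
      by_cases h4 : pvNorm w ≠ [] ∧ w.length ≤ 6 ∧ (pvAnyDigit (pvNorm w) = true ∨ pvHasIdPunct w = true) <;>
      cases a <;> cases b <;> cases c <;>
      simp [h1, h2, h3, h4, ih] <;>
      (try (split <;> simp_all))

-- splitting each category list at position k
theorem pvNumF_take (k : Nat) : ∀ (i : Int) (ws : List (List Char)),
    pvNumF i ws = pvNumF i (ws.take k) ++ pvNumF (i + k) (ws.drop k) := by
  induction k with
  | zero => intro i ws; simp [pvNumF]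
  | succ k ih =>
    intro i ws
    cases ws with
    | nil => simp [pvNumF]
    | cons w ws =>
      simp only [List.take_succ_cons, List.drop_succ_cons, pvNumF]
      have hc : i + ((k + 1 : Nat) : Int) = (i + 1) + (k : Int) := by push_cast; ring
      rw [hc]
      split <;> simp [ih (i + 1) ws]

theorem pvShF_take (k : Nat) : ∀ (i : Int) (ws : List (List Char)),
    pvShF i ws = pvShF i (ws.take k) ++ pvShF (i + k) (ws.drop k) := by
  induction k with
  | zero => intro i ws; simp [pvShF]
  | succ k ih =>
    intro i ws
    cases ws with
    | nil => simp [pvShF]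
    | cons w ws =>
      simp only [List.take_succ_cons, List.drop_succ_cons, pvShF]
      have hc : i + ((k + 1 : Nat) : Int) = (i + 1) + (k : Int) := by push_cast; ring
      rw [hc]
      split <;> simp [ih (i + 1) ws]

theorem pvPoF_take (k : Nat) : ∀ (i : Int) (ws : List (List Char)),
    pvPoF i ws = pvPoF i (ws.take k) ++ pvPoF (i + k) (ws.drop k) := by
  induction k with
  | zero => intro i ws; simp [pvPoF]
  | succ k ih =>
    intro i ws
    cases ws with
    | nil => simp [pvPoF]
    | cons w ws =>
      simp only [List.take_succ_cons, List.drop_succ_cons, pvPoF]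
      have hc : i + ((k + 1 : Nat) : Int) = (i + 1) + (k : Int) := by push_cast; ring
      rw [hc]
      split <;> simp [ih (i + 1) ws]

-- position bounds of the category-list entries
theorem pvNumF_mem (ws : List (List Char)) : ∀ (i : Int) (p : Int × List Char),
    p ∈ pvNumF i ws → i ≤ p.1 ∧ PySem.Chars.strIsdigit p.2 = true := by
  induction ws with
  | nil => intro i p h; simp [pvNumF] at h
  | cons w ws ih =>
    intro i p h
    simp only [pvNumF] at h
    split at h
    · rcases List.mem_cons.mp h with rfl | h'
      · simp_all
      · have := ih (i + 1) p h'
        exact ⟨by omega, this.2⟩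
    · have := ih (i + 1) p h
      exact ⟨by omega, this.2⟩

theorem pvShF_mem (ws : List (List Char)) : ∀ (i : Int) (p : Int × List Char),
    p ∈ pvShF i ws → i ≤ p.1 ∧ pvAnyDigit p.2 = true := by
  induction ws with
  | nil => intro i p h; simp [pvShF] at h
  | cons w ws ih =>
    intro i p h
    simp only [pvShF] at h
    split at h
    · rcases List.mem_cons.mp h with rfl | h'
      · simp_all
      · have := ih (i + 1) p h'
        exact ⟨by omega, this.2⟩
    · have := ih (i + 1) p h
      exact ⟨by omega, this.2⟩

theorem pvShF_mem_lt (ws : List (List Char)) : ∀ (i : Int) (p : Int × List Char),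
    p ∈ pvShF i ws → p.1 < i + ws.length := by
  induction ws with
  | nil => intro i p h; simp [pvShF] at h
  | cons w ws ih =>
    intro i p h
    simp only [pvShF] at h
    have hl : ((w :: ws).length : Int) = (ws.length : Int) + 1 := by push_cast [List.length_cons]; ring
    split at h
    · rcases List.mem_cons.mp h with rfl | h'
      · simp
      · have := ih (i + 1) p h'
        omega
    · have := ih (i + 1) p h
      omega

theorem pvPoF_mem_lt (ws : List (List Char)) : ∀ (i : Int) (p : Int × List Char),
    p ∈ pvPoF i ws → i ≤ p.1 ∧ p.1 < i + ws.length := by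
  induction ws with
  | nil => intro i p h; simp [pvPoF] at h
  | cons w ws ih =>
    intro i p h
    simp only [pvPoF] at h
    have hl : ((w :: ws).length : Int) = (ws.length : Int) + 1 := by push_cast [List.length_cons]; ring
    split at h
    · rcases List.mem_cons.mp h with rfl | h'
      · simp
      · have := ih (i + 1) p h'
        omega
    · have := ih (i + 1) p h
      omega

theorem pvFind?_eq_head?_of_all {α : Type} (l : List α) (p : α → Bool)
    (h : ∀ x ∈ l, p x = true) : l.find? p = l.head? := by
  cases l with
  | nil => rfl
  | cons x xs => simp [h x (by simp)]

theorem pvFind?_congr_mem {α : Type} (l : List α) (p q : α → Bool)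
    (h : ∀ x ∈ l, p x = q x) : l.find? p = l.find? q := by
  induction l with
  | nil => rfl
  | cons x xs ih =>
    rw [List.find?_cons, List.find?_cons, h x (by simp)]
    cases hq : q x
    · exact ih (fun y hy => h y (by simp [hy]))
    · rfl

theorem pvPoN_head (ws : List (List Char)) : ∀ (i : Int),
    ((pvPoF i ws).find? (fun p => !decide (pvNorm p.2 = []))).map (fun p => (p.1, pvNorm p.2)) =
      (pvPoN i ws).head? := by
  induction ws with
  | nil => intro i; simp [pvPoF, pvPoN]
  | cons w ws ih =>
    intro i
    simp only [pvPoF, pvPoN]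
    by_cases hpo : w.length ≤ 6 ∧ (pvAnyDigit (pvNorm w) = true ∨ pvHasIdPunct w = true)
    · by_cases hn : pvNorm w ≠ [] <;> simp [hpo, hn, ih]
    · simp [hpo, ih]

-- bridges from A's full-list searches to B's searches over words[:4]
theorem pvNum_bridge (ws : List (List Char)) :
    (pvNumF 0 ws).find? (fun p => decide (p.1 ≤ 2)) =
      (pvNumF 0 (ws.take 4)).find? (fun p => decide (p.1 ≤ 2)) := by
  rw [pvNumF_take 4 0 ws, List.find?_append, pvNumF_find_none (ws.drop 4) (0 + (4 : Nat)) (by omega)]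
  simp

theorem pvSh_bridge (ws : List (List Char)) :
    (pvShF 0 ws).find? (fun p => decide (p.1 ≤ 3)) = (pvShF 0 (ws.take 4)).head? := by
  rw [pvShF_take 4 0 ws, List.find?_append, pvShF_find_none (ws.drop 4) (0 + (4 : Nat)) (by omega)]
  rw [pvFind?_eq_head?_of_all]
  · simp
  · intro p hp
    have h1 := pvShF_mem_lt (ws.take 4) 0 p hp
    have h2 : (ws.take 4).length ≤ 4 := by simp
    simp only [decide_eq_true_eq]
    omega

theorem pvPo_bridge (ws : List (List Char)) :
    ((pvPoF 0 ws).find? (fun p => decide (p.1 ≤ 3) && decide (pvNorm p.2 ≠ []))).map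
        (fun p => (p.1, pvNorm p.2)) =
      (pvPoN 0 (ws.take 4)).head? := by
  rw [pvPoF_take 4 0 ws, List.find?_append, pvPoF_find_none (ws.drop 4) (0 + (4 : Nat)) (by omega)]
  rw [pvFind?_congr_mem (pvPoF 0 (ws.take 4))
    (fun p => decide (p.1 ≤ 3) && decide (pvNorm p.2 ≠ [])) (fun p => !decide (pvNorm p.2 = []))
    (by intro p hp
        have h1 := pvPoF_mem_lt (ws.take 4) 0 p hp
        have h2 : (ws.take 4).length ≤ 4 := by simp
        have h3 : p.1 ≤ 3 := by omega
        simp [h3, decide_not])]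
  simp [pvPoN_head]

theorem pvScanB_eq (ws : List (List Char)) :
    pvScanB ws =
      ((pvNumF 0 ws).find? (fun p => decide (p.1 ≤ 2)),
       (pvShF 0 ws).find? (fun p => decide (p.1 ≤ 3)),
       ((pvPoF 0 ws).find? (fun p => decide (p.1 ≤ 3) && decide (pvNorm p.2 ≠ []))).map
         (fun p => (p.1, pvNorm p.2))) := by
  unfold pvScanB
  have hs : PySem.List.slice ws none (some 4) = ws.take 4 := by simp [PySem.List.slice]
  rw [hs, pvScan_fold (ws.take 4) 0 none none none]
  rw [pvNum_bridge ws, pvSh_bridge ws, pvPo_bridge ws]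
  simp [Option.or]

theorem pvStrIsdigit_ne_nil {cs : List Char} (h : PySem.Chars.strIsdigit cs = true) : cs ≠ [] := by
  intro he
  rw [he] at h
  simp [PySem.Chars.strIsdigit] at h

theorem pvAnyDigit_ne_nil {cs : List Char} (h : pvAnyDigit cs = true) : cs ≠ [] := by
  intro he
  rw [he] at h
  simp [pvAnyDigit] at h

-- ===== VERDICT (by name: the statement is the Claim_ definition above) =====
theorem hm_intelligent_split_section_act_py_spec : Claim_equal_hm_intelligent_split_section_act_py := by
  intro text _
  unfold Spec_hm_intelligent_split_section_act_py
  unfold hm_intelligent_split_section_act_py hm_intelligent_split_section_act_py_alt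
  by_cases ht : PySem.Chars.strip text.toList = []
  · simp [ht]
  · simp only [if_neg ht]
    by_cases hlen : (PySem.Chars.split₀ (PySem.Chars.strip text.toList)).length < 2
    · simp [hlen]
    · simp only [if_neg hlen]
      rw [pvScanB_eq]
      unfold pvFindIdentA
      rw [pvAnalyzeA_eq _ ht]
      simp only [decide_not]
      set ws := PySem.Chars.split₀ (PySem.Chars.strip text.toList) with hws
      rcases hnum : List.find? (fun p => decide (p.1 ≤ 2)) (pvNumF 0 ws) with _ | ⟨pos, n⟩
      · rcases hsh : List.find? (fun p => decide (p.1 ≤ 3)) (pvShF 0 ws) with _ | ⟨pos, n⟩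
        · rcases hpo : List.find? (fun p => decide (p.1 ≤ 3) && !decide (pvNorm p.2 = [])) (pvPoF 0 ws)
            with _ | ⟨pos, w⟩
          · simp [hnum, hsh, hpo]
          · obtain ⟨hp3, hpne⟩ : pos ≤ 3 ∧ pvNorm w ≠ [] := by
              have := List.find?_some hpo
              simpa using this
            have hpos0 : (0 : Int) ≤ pos := (pvPoF_mem_lt ws 0 (pos, w) (List.mem_of_find?_eq_some hpo)).1
            simp only [hnum, hsh, hpo, Option.map_some]
            rw [if_pos ⟨hpne, hpos0⟩]
            simp [pvBuildB, Bool.and_assoc]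
        · have hmem := pvShF_mem ws 0 (pos, n) (List.mem_of_find?_eq_some hsh)
          have hne : n ≠ [] := pvAnyDigit_ne_nil hmem.2
          simp only [hnum, hsh]
          rw [if_pos ⟨hne, hmem.1⟩]
          simp [pvBuildB, Bool.and_assoc]
      · have hmem := pvNumF_mem ws 0 (pos, n) (List.mem_of_find?_eq_some hnum)
        have hne : n ≠ [] := pvStrIsdigit_ne_nil hmem.2
        simp only [hnum]
        by_cases hnx : pos + 1 < PySem.List.len ws
        · simp only [if_pos hnx]
          by_cases ha : (PySem.List.pyGetD ws (pos + 1) []).length = 1 ∧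
              PySem.Chars.strIsalpha (PySem.List.pyGetD ws (pos + 1) []) = true
          · simp only [if_pos ha]
            rw [if_pos ⟨by simp [hne], hmem.1⟩]
            simp [pvBuildB, Bool.and_assoc]
          · simp only [if_neg ha]
            rw [if_pos ⟨hne, hmem.1⟩]
            simp [pvBuildB, Bool.and_assoc]
        · simp only [if_neg hnx]
          rw [if_pos ⟨hne, hmem.1⟩]
          simp [pvBuildB, Bool.and_assoc]
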